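-- pv_equiv track=rewrite | github.com/shabeebpk/vaquita | backend/app/ingestion/refinery/service.py | _split_into_spans
-- ===== SOURCE A (Python) =====
-- from typing import List, Optional, Callable
--
-- def _split_into_spans(text: str, max_chars: int) -> List[str]:
--     """Split text into manageable spans, trying to respect paragraph boundaries."""
--     if len(text) <= max_chars:
--         return [text]
--
--     spans = []
--     remaining = text
--     while len(remaining) > max_chars:
--         # Look for last double newline or newline within the window
--         split_idx = remaining.rfind("\n\n", 0, max_chars)
--         if split_idx == -1:
--             split_idx = remaining.rfind("\n", 0, max_chars)
--
--         # Emergency split at space if no newline found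
--         if split_idx == -1:
--             split_idx = remaining.rfind(" ", 0, max_chars)
--
--         # Absolute hard split if needed
--         if split_idx == -1:
--             split_idx = max_chars
--
--         spans.append(remaining[:split_idx].strip())
--         remaining = remaining[split_idx:].strip()
--
--     if remaining:
--         spans.append(remaining)
--
--     return spans
-- ===== SOURCE B (Python) =====
-- from typing import List
--
--
-- def _skip_ws_fwd(text: str, a: int, b: int) -> int:
--     while a < b and text[a].isspace():
--         a += 1
--     return a
--
--
-- def _skip_ws_back(text: str, a: int, b: int) -> int:
--     while b > a and text[b - 1].isspace():
--         b -= 1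
--     return b
--
--
-- def _split_into_spans(text: str, max_chars: int) -> List[str]:
--     """Index-pointer scan over the original string: no re-slicing of `remaining`."""
--     if len(text) <= max_chars:
--         return [text]
--
--     spans = []
--     lo, hi = 0, len(text)
--     while hi - lo > max_chars:
--         end = lo + max_chars
--         idx = text.rfind("\n\n", lo, end)
--         if idx == -1:
--             idx = text.rfind("\n", lo, end)
--         if idx == -1:
--             idx = text.rfind(" ", lo, end)
--         if idx == -1:
--             idx = end
--         a = _skip_ws_fwd(text, lo, idx)
--         b = _skip_ws_back(text, a, idx)
--         spans.append(text[a:b])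
--         lo = _skip_ws_fwd(text, idx, hi)
--         hi = _skip_ws_back(text, lo, hi)
--
--     if lo < hi:
--         spans.append(text[lo:hi])
--
--     return spans
-- ===== Notes on version B (the rewrite author's own statement) =====
-- stated objective: faster
-- what changed: B keeps (lo, hi) index pointers into the original string and does bounded rfind / whitespace-pointer-skips on it, instead of A's re-slicing and re-stripping of a shrinking `remaining` copy each iteration.
import Mathlib
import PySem

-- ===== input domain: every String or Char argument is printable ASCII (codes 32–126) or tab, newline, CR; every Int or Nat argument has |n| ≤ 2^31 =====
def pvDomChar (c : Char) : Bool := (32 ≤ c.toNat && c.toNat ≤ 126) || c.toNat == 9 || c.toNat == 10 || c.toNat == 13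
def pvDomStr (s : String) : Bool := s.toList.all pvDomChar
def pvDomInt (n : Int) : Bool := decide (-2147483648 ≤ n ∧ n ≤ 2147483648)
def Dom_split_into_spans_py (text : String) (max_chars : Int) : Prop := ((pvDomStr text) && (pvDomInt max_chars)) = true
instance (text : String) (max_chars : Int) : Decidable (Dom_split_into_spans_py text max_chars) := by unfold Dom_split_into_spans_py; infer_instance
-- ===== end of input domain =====

-- B replaces A's repeated re-slicing of `remaining` by an index-pointer scan (lo, hi)
-- over the original string (objective: faster by avoiding the per-iteration copies).

-- ===== PORT A =====
-- the while loop of A, one fuel tick per iteration (fuel = len(text)+1 always suffices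
-- on Pre_: each iteration strictly shortens `remaining`); state is `remaining` + `spans`.
def spansLoopA (fuel : Nat) (remaining : List Char) (maxc : Int) (spans : List String) : List String :=
  match fuel with
  | 0 => spans
  | f+1 =>
    if (remaining.length : Int) > maxc then
      -- split_idx = remaining.rfind("\n\n", 0, max_chars)
      let i1 := PySem.Chars.rfindFrom remaining ['\n', '\n'] 0 (some maxc)
      -- if -1: remaining.rfind("\n", 0, max_chars)
      let i2 := if i1 = -1 then PySem.Chars.rfindFrom remaining ['\n'] 0 (some maxc) else i1
      -- if -1: remaining.rfind(" ", 0, max_chars)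
      let i3 := if i2 = -1 then PySem.Chars.rfindFrom remaining [' '] 0 (some maxc) else i2
      -- if -1: max_chars
      let si : Int := if i3 = -1 then maxc else i3
      -- spans.append(remaining[:split_idx].strip())
      let spans' := spans ++ [String.ofList (PySem.Chars.strip (PySem.Chars.slice remaining none (some si)))]
      -- remaining = remaining[split_idx:].strip()
      let remaining' := PySem.Chars.strip (PySem.Chars.slice remaining (some si) none)
      spansLoopA f remaining' maxc spans'
    else
      -- if remaining: spans.append(remaining)
      if remaining.isEmpty then spans else spans ++ [String.ofList remaining]

def split_into_spans_py (text : String) (max_chars : Int) : List String :=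
  if (text.toList.length : Int) ≤ max_chars then [text]
  else spansLoopA (text.toList.length + 1) text.toList max_chars []

-- ===== PORT B =====
-- text[a:b] for 0 ≤ a, b (the only slices Source B takes)
def sublB (t : List Char) (a b : Nat) : List Char := (t.take b).drop a

-- _skip_ws_fwd: while a < b and text[a].isspace(): a += 1
def skipF (t : List Char) (b a : Nat) : Nat :=
  if _h : a < b ∧ PySem.Chars.isspace (t.getD a ' ') = true then skipF t b (a+1) else a
termination_by b - a

-- _skip_ws_back: while b > a and text[b-1].isspace(): b -= 1
def skipB (t : List Char) (a b : Nat) : Nat :=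
  if _h : a < b ∧ PySem.Chars.isspace (t.getD (b-1) ' ') = true then skipB t a (b-1) else b
termination_by b

-- the while loop of Source B; same fuel discipline as A's loop; state is (lo, hi) + spans
def spansLoopB (fuel : Nat) (t : List Char) (maxc : Int) (lo hi : Nat) (spans : List String) : List String :=
  match fuel with
  | 0 => spans
  | f+1 =>
    if (hi : Int) - lo > maxc then
      let endI : Int := lo + maxc
      let i1 := PySem.Chars.rfindFrom t ['\n', '\n'] lo (some endI)
      let i2 := if i1 = -1 then PySem.Chars.rfindFrom t ['\n'] lo (some endI) else i1
      let i3 := if i2 = -1 then PySem.Chars.rfindFrom t [' '] lo (some endI) else i2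
      let idx : Nat := if i3 = -1 then endI.toNat else i3.toNat
      let a := skipF t idx lo
      let b := skipB t a idx
      let spans' := spans ++ [String.ofList (sublB t a b)]
      let lo' := skipF t hi idx
      let hi' := skipB t lo' hi
      spansLoopB f t maxc lo' hi' spans'
    else
      if lo < hi then spans ++ [String.ofList (sublB t lo hi)] else spans

def split_into_spans_py_alt (text : String) (max_chars : Int) : List String :=
  if (text.toList.length : Int) ≤ max_chars then [text]
  else spansLoopB (text.toList.length + 1) text.toList max_chars 0 text.toList.length []

-- ===== PRECONDITION & SPEC =====
-- Pre_ excludes exactly the inputs on which Python A never returns (the while loop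
-- cannot make progress): max_chars ≤ 0 with a text longer than max_chars, where A
-- loops forever; it excludes no input on which A returns.
def Pre_split_into_spans_py (text : String) (max_chars : Int) : Prop :=
  1 ≤ max_chars ∨ (text.toList.length : Int) ≤ max_chars
instance (text : String) (max_chars : Int) : Decidable (Pre_split_into_spans_py text max_chars) := by unfold Pre_split_into_spans_py; infer_instance
def pvWitness_split_into_spans_py : String × Int := ("ab\ncd", 3)

def Spec_split_into_spans_py (text : String) (max_chars : Int) (out : List String) : Prop := out = split_into_spans_py_alt text max_chars
instance (text : String) (max_chars : Int) (out : List String) : Decidable (Spec_split_into_spans_py text max_chars out) := by unfold Spec_split_into_spans_py; infer_instance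

-- ===== CLAIM (what is proved, stated in full; the proofs are below) =====
def Claim_equal_split_into_spans_py : Prop := ∀ (text : String) (max_chars : Int), Dom_split_into_spans_py text max_chars → Pre_split_into_spans_py text max_chars → Spec_split_into_spans_py text max_chars (split_into_spans_py text max_chars)

-- ===== LEMMAS AND PROOFS =====

theorem length_sublB {t : List Char} {a b : Nat} (h1 : a ≤ b) (h2 : b ≤ t.length) :
    (sublB t a b).length = b - a := by
  simp [sublB]; omega

theorem take_sublB {t : List Char} {lo hi m : Nat} (h : lo + m ≤ hi) :
    (sublB t lo hi).take m = sublB t lo (lo + m) := by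
  simp [sublB, List.take_drop, List.take_take, Nat.min_eq_left h]

theorem drop_sublB {t : List Char} {lo hi m : Nat} :
    (sublB t lo hi).drop m = sublB t (lo + m) hi := by
  simp [sublB, List.drop_drop]

theorem sublB_nil {t : List Char} {a b : Nat} (h : b ≤ a) : sublB t a b = [] := by
  apply List.drop_eq_nil_of_le
  calc (t.take b).length ≤ b := by simp
    _ ≤ a := h

theorem sublB_cons {t : List Char} {a b : Nat} (h1 : a < b) (h2 : b ≤ t.length) :
    sublB t a b = t.getD a ' ' :: sublB t (a+1) b := by
  have ha : a < (t.take b).length := by simp; omega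
  rw [sublB, List.drop_eq_getElem_cons ha, sublB]
  congr 1
  rw [List.getElem_take]
  rw [List.getD_eq_getElem?_getD, List.getElem?_eq_getElem (by omega : a < t.length)]
  rfl

theorem sublB_snoc {t : List Char} {a b : Nat} (h1 : a < b) (h2 : b ≤ t.length) :
    sublB t a b = sublB t a (b-1) ++ [t.getD (b-1) ' '] := by
  have hb : b - 1 < t.length := by omega
  have ht : t.take b = t.take (b-1) ++ [t[b-1]] := by
    conv_lhs => rw [(by omega : b = (b-1) + 1)]
    rw [List.take_add_one, List.getElem?_eq_getElem hb]
    rfl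
  rw [sublB, ht, List.drop_append]
  have : a - (t.take (b-1)).length = 0 := by simp; omega
  rw [this]
  simp [sublB, List.getD_eq_getElem?_getD, List.getElem?_eq_getElem hb]

theorem rstrip_snoc (l : List Char) (c : Char) :
    PySem.Chars.rstrip (l ++ [c]) =
      if PySem.Chars.isspace c then PySem.Chars.rstrip l else l ++ [c] := by
  unfold PySem.Chars.rstrip
  rw [List.reverse_append]
  simp [List.dropWhile]
  split <;> simp_all

theorem skipF_spec {t : List Char} {b : Nat} : ∀ a, a ≤ b → b ≤ t.length →
    PySem.Chars.lstrip (sublB t a b) = sublB t (skipF t b a) b ∧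
    a ≤ skipF t b a ∧ skipF t b a ≤ b := by
  intro a
  induction a using skipF.induct t b with
  | case1 a h ih =>
    intro hab hb
    rw [skipF, dif_pos h]
    obtain ⟨heq, h1, h2⟩ := ih h.1 hb
    refine ⟨?_, by omega, h2⟩
    rw [sublB_cons h.1 hb]
    unfold PySem.Chars.lstrip at heq ⊢
    rw [List.dropWhile_cons_of_pos h.2]
    exact heq
  | case2 a h =>
    intro hab hb
    rw [skipF, dif_neg h]
    refine ⟨?_, le_rfl, hab⟩
    by_cases hab' : a < b
    · rw [sublB_cons hab' hb]
      unfold PySem.Chars.lstrip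
      rw [List.dropWhile_cons_of_neg]
      have hns : ¬ PySem.Chars.isspace (t.getD a ' ') = true := fun hc => h ⟨hab', hc⟩
      simpa [← List.getD_eq_getElem?_getD] using hns
    · rw [sublB_nil (by omega)]
      rfl

theorem skipB_spec {t : List Char} {a : Nat} : ∀ b, a ≤ b → b ≤ t.length →
    PySem.Chars.rstrip (sublB t a b) = sublB t a (skipB t a b) ∧
    a ≤ skipB t a b ∧ skipB t a b ≤ b := by
  intro b
  induction b using skipB.induct t a with
  | case1 b h ih =>
    intro hab hb
    rw [skipB, dif_pos h]
    obtain ⟨heq, h1, h2⟩ := ih (by omega) (by omega)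
    refine ⟨?_, h1, by omega⟩
    rw [sublB_snoc h.1 hb, rstrip_snoc, if_pos h.2]
    exact heq
  | case2 b h =>
    intro hab hb
    rw [skipB, dif_neg h]
    refine ⟨?_, hab, le_rfl⟩
    by_cases hab' : a < b
    · have hns : ¬ PySem.Chars.isspace (t.getD (b-1) ' ') = true := fun hc => h ⟨hab', hc⟩
      rw [sublB_snoc hab' hb, rstrip_snoc, if_neg hns]
    · rw [sublB_nil (by omega)]
      rfl

theorem rfind_go_cases (s sub : List Char) : ∀ m : Nat,
    PySem.Chars.rfind.go s sub m = -1 ∨ (0 ≤ PySem.Chars.rfind.go s sub m ∧ PySem.Chars.rfind.go s sub m ≤ m) := by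
  intro m
  induction m with
  | zero =>
    rw [PySem.Chars.rfind.go]
    split <;> simp
  | succ j ih =>
    rw [PySem.Chars.rfind.go]
    split
    · right; constructor <;> [positivity; exact_mod_cast le_rfl]
    · rcases ih with h | ⟨h1, h2⟩
      · left; exact h
      · right; refine ⟨h1, ?_⟩; exact h2.trans (by exact_mod_cast Nat.le_succ j)

theorem rfind_cases (s sub : List Char) :
    PySem.Chars.rfind s sub = -1 ∨ (0 ≤ PySem.Chars.rfind s sub ∧ PySem.Chars.rfind s sub ≤ s.length) := by
  exact rfind_go_cases s sub s.length

theorem rfindFrom_window (t sub : List Char) (st e : Int) (h0 : 0 ≤ st) (hse : st ≤ e)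
    (he : e ≤ (t.length : Int)) :
    PySem.Chars.rfindFrom t sub st (some e) =
      (if PySem.Chars.rfind ((t.take e.toNat).drop st.toNat) sub = -1 then -1
       else st + PySem.Chars.rfind ((t.take e.toNat).drop st.toNat) sub) := by
  unfold PySem.Chars.rfindFrom
  have hev : (if (t.length:Int) < e then (t.length:Int)
      else if e < 0 then (if e + t.length < 0 then 0 else e + t.length) else e) = e := by
    rw [if_neg (by omega), if_neg (by omega)]
  have hst : (if st < 0 then (if st + (t.length:Int) < 0 then 0 else st + t.length) else st) = st := by
    rw [if_neg (by omega)]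
  simp only []
  rw [hev, hst, if_neg (by omega)]

theorem rfindFromA_eq {s sub : List Char} {maxc : Int} (h1 : 0 ≤ maxc) (h2 : maxc < (s.length : Int)) :
    PySem.Chars.rfindFrom s sub 0 (some maxc) =
      (if PySem.Chars.rfind (s.take maxc.toNat) sub = -1 then -1
       else PySem.Chars.rfind (s.take maxc.toNat) sub) := by
  rw [rfindFrom_window s sub 0 maxc le_rfl h1 (by omega)]
  simp

theorem rfindFromB_eq {t sub : List Char} {lo : Nat} {maxc : Int} (h1 : 0 ≤ maxc)
    (h2 : (lo : Int) + maxc ≤ t.length) :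
    PySem.Chars.rfindFrom t sub lo (some ((lo : Int) + maxc)) =
      (if PySem.Chars.rfind ((t.take (lo + maxc.toNat)).drop lo) sub = -1 then -1
       else (lo : Int) + PySem.Chars.rfind ((t.take (lo + maxc.toNat)).drop lo) sub) := by
  rw [rfindFrom_window t sub lo ((lo:Int) + maxc) (by omega) (by omega) h2]
  have e1 : ((lo : Int) + maxc).toNat = lo + maxc.toNat := by omega
  have e2 : ((lo : Nat) : Int).toNat = lo := by omega
  rw [e1, e2]


theorem stepEq {t : List Char} {maxc : Int} (f : Nat)
    (ih : ∀ lo hi spans, lo ≤ hi → hi ≤ t.length →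
      spansLoopA f (sublB t lo hi) maxc spans = spansLoopB f t maxc lo hi spans)
    (lo hi : Nat) (spans : List String) (h1 : lo ≤ hi) (h2 : hi ≤ t.length)
    (hc : (hi : Int) - lo > maxc) (si : Int) (hs0 : 0 ≤ si) (hs1 : si ≤ maxc) :
    spansLoopA f (PySem.Chars.strip (PySem.Chars.slice (sublB t lo hi) (some si) none)) maxc
        (spans ++ [String.ofList (PySem.Chars.strip (PySem.Chars.slice (sublB t lo hi) none (some si)))])
      = spansLoopB f t maxc (skipF t hi (lo + si.toNat))
          (skipB t (skipF t hi (lo + si.toNat)) hi)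
          (spans ++ [String.ofList (sublB t (skipF t (lo + si.toNat) lo)
              (skipB t (skipF t (lo + si.toNat) lo) (lo + si.toNat)))]) := by
  have hidx : lo + si.toNat < hi := by omega
  have e_to : PySem.Chars.slice (sublB t lo hi) none (some si) = sublB t lo (lo + si.toNat) := by
    rw [PySem.Chars.slice_eq_listSlice, PySem.List.slice_to _ hs0, take_sublB (by omega)]
  have e_from : PySem.Chars.slice (sublB t lo hi) (some si) none = sublB t (lo + si.toNat) hi := by
    rw [PySem.Chars.slice_eq_listSlice, PySem.List.slice_from _ hs0, drop_sublB]
  obtain ⟨eF, aF1, aF2⟩ := skipF_spec (t := t) (b := lo + si.toNat) lo (by omega) (by omega)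
  obtain ⟨eB, bF1, bF2⟩ := skipB_spec (t := t) (a := skipF t (lo + si.toNat) lo) (lo + si.toNat) aF2 (by omega)
  obtain ⟨eF2, c1, c2⟩ := skipF_spec (t := t) (b := hi) (lo + si.toNat) (by omega) h2
  obtain ⟨eB2, d1, d2⟩ := skipB_spec (t := t) (a := skipF t hi (lo + si.toNat)) hi c2 h2
  rw [e_to, e_from]
  unfold PySem.Chars.strip
  rw [eF, eB, eF2, eB2]
  exact ih _ _ _ d1 (le_trans d2 h2)

theorem loopEq {t : List Char} {maxc : Int} (hm : 1 ≤ maxc) :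
    ∀ fuel lo hi spans, lo ≤ hi → hi ≤ t.length →
    spansLoopA fuel (sublB t lo hi) maxc spans = spansLoopB fuel t maxc lo hi spans := by
  intro fuel
  induction fuel with
  | zero => intro lo hi spans _ _; rfl
  | succ f ih =>
    intro lo hi spans h1 h2
    have hlen : ((sublB t lo hi).length : Int) = (hi : Int) - lo := by
      rw [length_sublB h1 h2]; omega
    rw [spansLoopA, spansLoopB]
    by_cases hc : (hi : Int) - lo > maxc
    · rw [if_pos (by rw [hlen]; exact hc), if_pos hc]
      have hmn : lo + maxc.toNat < hi := by omega
      have hA2 : maxc < ((sublB t lo hi).length : Int) := by rw [hlen]; omega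
      have hB2 : (lo : Int) + maxc ≤ (t.length : Int) := by omega
      simp only []
      rw [rfindFromA_eq (by omega) hA2, rfindFromA_eq (by omega) hA2,
          rfindFromA_eq (by omega) hA2,
          rfindFromB_eq (by omega) hB2, rfindFromB_eq (by omega) hB2,
          rfindFromB_eq (by omega) hB2]
      rw [take_sublB (le_of_lt hmn)]
      have ebs : (t.take (lo + maxc.toNat)).drop lo = sublB t lo (lo + maxc.toNat) := rfl
      rw [ebs]
      have hlw : (sublB t lo (lo + maxc.toNat)).length = maxc.toNat :=
        by rw [length_sublB (by omega) (by omega)]; omega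
      have hetn : ((lo : Int) + maxc).toNat = lo + maxc.toNat := by omega
      by_cases b1 : PySem.Chars.rfind (sublB t lo (lo + maxc.toNat)) ['\n', '\n'] = -1
      · simp only [if_pos b1, reduceIte]
        by_cases b2 : PySem.Chars.rfind (sublB t lo (lo + maxc.toNat)) ['\n'] = -1
        · simp only [if_pos b2, reduceIte]
          by_cases b3 : PySem.Chars.rfind (sublB t lo (lo + maxc.toNat)) [' '] = -1
          · simp only [if_pos b3, reduceIte]
            rw [hetn]
            exact stepEq f ih lo hi spans h1 h2 hc maxc (by omega) le_rfl
          · obtain ⟨g, l⟩ := (rfind_cases _ _).resolve_left b3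
            rw [hlw] at l
            have hne : ¬((lo : Int) + PySem.Chars.rfind (sublB t lo (lo + maxc.toNat)) [' '] = -1) := by omega
            simp only [if_neg b3, if_neg hne]
            rw [show ((lo : Int) + PySem.Chars.rfind (sublB t lo (lo + maxc.toNat)) [' ']).toNat = lo + (PySem.Chars.rfind (sublB t lo (lo + maxc.toNat)) [' ']).toNat from by omega]
            exact stepEq f ih lo hi spans h1 h2 hc _ g (by omega)
        · obtain ⟨g, l⟩ := (rfind_cases _ _).resolve_left b2
          rw [hlw] at l
          have hne : ¬((lo : Int) + PySem.Chars.rfind (sublB t lo (lo + maxc.toNat)) ['\n'] = -1) := by omega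
          simp only [if_neg b2, if_neg hne]
          rw [show ((lo : Int) + PySem.Chars.rfind (sublB t lo (lo + maxc.toNat)) ['\n']).toNat = lo + (PySem.Chars.rfind (sublB t lo (lo + maxc.toNat)) ['\n']).toNat from by omega]
          exact stepEq f ih lo hi spans h1 h2 hc _ g (by omega)
      · obtain ⟨g, l⟩ := (rfind_cases _ _).resolve_left b1
        rw [hlw] at l
        have hne : ¬((lo : Int) + PySem.Chars.rfind (sublB t lo (lo + maxc.toNat)) ['\n', '\n'] = -1) := by omega
        simp only [if_neg b1, if_neg hne]
        rw [show ((lo : Int) + PySem.Chars.rfind (sublB t lo (lo + maxc.toNat)) ['\n', '\n']).toNat = lo + (PySem.Chars.rfind (sublB t lo (lo + maxc.toNat)) ['\n', '\n']).toNat from by omega]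
        exact stepEq f ih lo hi spans h1 h2 hc _ g (by omega)
    · rw [if_neg (by rw [hlen]; exact hc), if_neg hc]
      by_cases hlh : lo < hi
      · rw [if_pos hlh, if_neg (by
          simp only [List.isEmpty_iff_length_eq_zero, length_sublB h1 h2]
          omega)]
      · rw [if_neg hlh, if_pos (by
          simp only [List.isEmpty_iff_length_eq_zero, length_sublB h1 h2]
          omega)]

-- ===== VERDICT (by name: the statement is the Claim_ definition above) =====
theorem split_into_spans_py_spec : Claim_equal_split_into_spans_py := by
  intro text maxc _hdom hpre
  unfold Spec_split_into_spans_py split_into_spans_py split_into_spans_py_alt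
  by_cases hle : (text.toList.length : Int) ≤ maxc
  · rw [if_pos hle, if_pos hle]
  · have hm : 1 ≤ maxc := by
      rcases hpre with h | h
      · exact h
      · exact absurd h hle
    rw [if_neg hle, if_neg hle]
    have h0 : sublB text.toList 0 text.toList.length = text.toList := by
      simp [sublB]
    have := loopEq hm (text.toList.length + 1) 0 text.toList.length [] (Nat.zero_le _) le_rfl
    rwa [h0] at this
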